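-- pv_equiv track=rewrite | github.com/handee/aoc19 | day4.py | is_legalpart2
-- ===== SOURCE A (Python) =====
-- def is_legalpart2(pw):
--     digits=list(pw)
--     contains_double=False
--     monotonic_increase=True
--     for n in range(0, len(digits)-1):
--         if (digits[n]==digits[n+1]):
--             # there are two in a row.
--             # if there's a digit before, is it different?
--             dbf=False #different number before
--             dba=False #different number after
--             if n==0: # it's the start of the code
--                 dbf=True
--             elif n > 0 and digits[n-1]!=digits[n]:
--                 dbf=True
--             if n+2>=len(digits):
--                 dba=True # it's the end of the code
--             elif n<len(digits)-2 and digits[n+2]!=digits[n]: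
--                 dba=True
--             if dba and dbf:
--                 contains_double=True
--
--         if (int(digits[n])>int(digits[n+1])):
--             monotonic_increase=False
--     if monotonic_increase and contains_double:
--         return(True)
--     else:
--         return(False)
-- ===== SOURCE B (Python) =====
-- def is_legalpart2(pw):
--     def same_prefix(c, s):
--         # length of the leading run of character c in s
--         n = 0
--         for x in s:
--             if x != c:
--                 break
--             n += 1
--         return n
--
--     def run_lengths(s):
--         # lengths of the maximal runs of equal characters, left to right
--         if not s:
--             return []
--         k = 1 + same_prefix(s[0], s[1:])
--         return [k] + run_lengths(s[k:])
--
--     pairint = [(int(a), int(b)) for a, b in zip(pw, pw[1:])]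
--     monotonic = all(a <= b for a, b in pairint)
--     return monotonic and any(n == 2 for n in run_lengths(pw))
-- ===== Notes on version B (the rewrite author's own statement) =====
-- stated objective: alternative
-- what changed: Replaces A's per-index neighbour-flag bookkeeping (inspecting digits[n-1..n+2] for every n) by a run-length decomposition: recursively split the string into maximal runs of equal characters and ask for a run of length exactly 2, with a separate pairwise zip check for monotonicity.
import Mathlib
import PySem

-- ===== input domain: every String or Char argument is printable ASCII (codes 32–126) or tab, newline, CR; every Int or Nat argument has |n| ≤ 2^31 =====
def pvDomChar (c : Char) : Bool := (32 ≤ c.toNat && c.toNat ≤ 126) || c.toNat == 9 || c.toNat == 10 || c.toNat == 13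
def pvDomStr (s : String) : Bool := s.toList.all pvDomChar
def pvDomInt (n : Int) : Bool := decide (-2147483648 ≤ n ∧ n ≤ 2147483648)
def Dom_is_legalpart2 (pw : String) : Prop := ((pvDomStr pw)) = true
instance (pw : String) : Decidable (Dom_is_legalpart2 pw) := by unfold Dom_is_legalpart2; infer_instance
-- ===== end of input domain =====

-- B replaces A's per-index neighbour-flag scan by a maximal-run-length decomposition
-- plus a pairwise monotonicity check (alternative decomposition, similar cost).


-- ===== PORT A =====
-- one iteration of A's for-loop; state = (contains_double, monotonic_increase);
-- Option: none = a ValueError raised by int() (excluded by Pre_is_legalpart2)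
def aStep (ds : List Char) (acc : Option (Bool × Bool)) (n : Int) : Option (Bool × Bool) :=
  match acc with
  | none => none
  | some (cd, mi) =>
    match PySem.List.pyGet? ds n, PySem.List.pyGet? ds (n + 1) with
    | some dn, some dn1 =>
      let cd :=
        if dn = dn1 then
          let dbf :=
            if n = 0 then true
            else if n > 0 ∧ PySem.List.pyGet? ds (n - 1) ≠ some dn then true
            else false
          let dba :=
            if n + 2 ≥ (ds.length : Int) then true
            else if n < (ds.length : Int) - 2 ∧ PySem.List.pyGet? ds (n + 2) ≠ some dn then true
            else false
          if dba ∧ dbf then true else cd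
        else cd
      match PySem.Int.ofStr? (String.ofList [dn]), PySem.Int.ofStr? (String.ofList [dn1]) with
      | some a, some b => some (cd, if a > b then false else mi)
      | _, _ => none
    | _, _ => none

def is_legalpart2 (pw : String) : Bool :=
  let digits := pw.toList
  match (PySem.List.pyRange 0 ((digits.length : Int) - 1) 1).foldl (aStep digits) (some (false, true)) with
  | some (cd, mi) => if mi ∧ cd then true else false
  | none => false   -- Python raises ValueError here; these inputs are excluded by Pre_is_legalpart2

-- ===== PORT B =====
-- length of the leading run of character c in s (Source B: same_prefix)
def samePrefix (c : Char) : List Char → Nat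
  | [] => 0
  | x :: t => if x ≠ c then 0 else 1 + samePrefix c t

-- lengths of the maximal runs of equal characters, left to right (Source B: run_lengths)
def runLengths : List Char → List Nat
  | [] => []
  | c :: rest =>
    let k := 1 + samePrefix c rest
    k :: runLengths (List.drop k (c :: rest))
termination_by l => l.length
decreasing_by simp only [List.length_drop, List.length_cons]; omega

-- the comprehension [(int(a), int(b)) for a, b in zip(pw, pw[1:])]; none = ValueError from int()
def pairInts : List (Char × Char) → Option (List (Int × Int))
  | [] => some []
  | (a, b) :: t =>
    match PySem.Int.ofStr? (String.ofList [a]), PySem.Int.ofStr? (String.ofList [b]) with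
    | some x, some y => (pairInts t).map (fun r => (x, y) :: r)
    | _, _ => none

def is_legalpart2_alt (pw : String) : Bool :=
  match pairInts ((pw.toList).zip (pw.toList.drop 1)) with
  | some pairint =>
    let monotonic := pairint.all (fun p => decide (p.1 ≤ p.2))
    monotonic && (runLengths pw.toList).any (fun n => n == 2)
  | none => false   -- Python raises ValueError here; these inputs are excluded by Pre_is_legalpart2

-- ===== PRECONDITION & SPEC =====
-- Pre_ excludes exactly the inputs on which A raises ValueError (from int() on a
-- non-digit character, reached whenever the string has length ≥ 2): admitted are
-- all-digit strings and arbitrary strings of length ≤ 1 (where A's loop never runs).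
def Pre_is_legalpart2 (pw : String) : Prop :=
  pw.toList.length ≤ 1 ∨ pw.toList.all (fun c => c.isDigit) = true
instance (pw : String) : Decidable (Pre_is_legalpart2 pw) := by unfold Pre_is_legalpart2; infer_instance
def pvWitness_is_legalpart2 : String := "112233"

def Spec_is_legalpart2 (pw : String) (out : Bool) : Prop := out = is_legalpart2_alt pw
instance (pw : String) (out : Bool) : Decidable (Spec_is_legalpart2 pw out) := by unfold Spec_is_legalpart2; infer_instance

-- ===== CLAIM (what is proved, stated in full; the proofs are below) =====
def Claim_equal_is_legalpart2 : Prop := ∀ (pw : String), Dom_is_legalpart2 pw → Pre_is_legalpart2 pw → Spec_is_legalpart2 pw (is_legalpart2 pw)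

-- ===== LEMMAS AND PROOFS =====

-- index-based window condition extracted from A's loop body (Nat indices, total get)
def winP (ds : List Char) (n : Nat) : Bool :=
  (ds.getD n ' ' == ds.getD (n + 1) ' ') &&
  (n == 0 || ds.getD (n - 1) ' ' != ds.getD n ' ') &&
  (decide (ds.length ≤ n + 2) || ds.getD (n + 2) ' ' != ds.getD n ' ')

-- index-based "adjacent decrease" condition from A's loop body
def decQ (ds : List Char) (n : Nat) : Bool :=
  decide ((ds.getD (n + 1) ' ') < (ds.getD n ' '))

theorem char_eq_of_toNat (c d : Char) (h : c.toNat = d.toNat) : c = d := by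
  apply Char.ext
  apply UInt32.toBitVec_inj.mp
  apply BitVec.eq_of_toNat_eq
  exact h

set_option maxRecDepth 8192 in
theorem ofStr?_digit (c : Char) (h : c.isDigit = true) :
    PySem.Int.ofStr? (String.ofList [c]) = some ((c.toNat : Int) - 48) := by
  have hb : 48 ≤ c.toNat ∧ c.toNat ≤ 57 := by
    simp [Char.isDigit] at h
    exact h
  have h10 : c.toNat = 48 ∨ c.toNat = 49 ∨ c.toNat = 50 ∨ c.toNat = 51 ∨ c.toNat = 52 ∨
      c.toNat = 53 ∨ c.toNat = 54 ∨ c.toNat = 55 ∨ c.toNat = 56 ∨ c.toNat = 57 := by omega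
  rcases h10 with h | h | h | h | h | h | h | h | h | h <;>
  [ (have hc : c = '0' := char_eq_of_toNat c '0' (by rw [h]; rfl));
    (have hc : c = '1' := char_eq_of_toNat c '1' (by rw [h]; rfl));
    (have hc : c = '2' := char_eq_of_toNat c '2' (by rw [h]; rfl));
    (have hc : c = '3' := char_eq_of_toNat c '3' (by rw [h]; rfl));
    (have hc : c = '4' := char_eq_of_toNat c '4' (by rw [h]; rfl));
    (have hc : c = '5' := char_eq_of_toNat c '5' (by rw [h]; rfl));
    (have hc : c = '6' := char_eq_of_toNat c '6' (by rw [h]; rfl));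
    (have hc : c = '7' := char_eq_of_toNat c '7' (by rw [h]; rfl));
    (have hc : c = '8' := char_eq_of_toNat c '8' (by rw [h]; rfl));
    (have hc : c = '9' := char_eq_of_toNat c '9' (by rw [h]; rfl))] <;>
  (subst hc; decide)
theorem mono_char (ds : List Char) :
    ((ds.zip (ds.drop 1)).all (fun p => decide (p.1 ≤ p.2))) =
      !((List.range (ds.length - 1)).any (decQ ds)) := by
  induction ds with
  | nil => simp
  | cons c tail ih =>
    cases tail with
    | nil => simp
    | cons d t =>
      simp only [List.drop_one, List.tail_cons, List.zip_cons_cons, List.all_cons] at *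
      have hlen : (c :: d :: t).length - 1 = (d :: t).length - 1 + 1 := by simp
      rw [hlen, List.range_succ_eq_map, List.any_cons, List.any_map]
      have h2 : ((List.range ((d :: t).length - 1)).any (decQ (c :: d :: t) ∘ Nat.succ)) =
          ((List.range ((d :: t).length - 1)).any (decQ (d :: t))) := by
        apply PySem.List.any_congr_mem
        intro x _
        simp [decQ]
      rw [h2, Bool.not_or, ← ih]
      have h3 : (!decide (d < c)) = decide (c ≤ d) := by simp [← decide_not, not_lt]
      simp [decQ, h3]

theorem samePrefix_le (c : Char) (l : List Char) : samePrefix c l ≤ l.length := by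
  induction l with
  | nil => simp [samePrefix]
  | cons x t ih => simp only [samePrefix, List.length_cons]; split <;> omega

theorem samePrefix_get (c : Char) (l : List Char) :
    ∀ i < samePrefix c l, l.getD i ' ' = c := by
  induction l with
  | nil => simp [samePrefix]
  | cons x t ih =>
    intro i hi
    simp only [samePrefix] at hi
    split at hi
    · omega
    · rename_i hx
      cases i with
      | zero => simpa using by simpa using hx
      | succ j => simpa using ih j (by omega)

theorem samePrefix_max (c : Char) (l : List Char) (h : samePrefix c l < l.length) :
    l.getD (samePrefix c l) ' ' ≠ c := by
  induction l with
  | nil => simp [samePrefix] at h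
  | cons x t ih =>
    by_cases hx' : x = c
    · have hs : samePrefix c (x :: t) = 1 + samePrefix c t := by simp [samePrefix, hx']
      rw [hs] at h ⊢
      have h' : samePrefix c t < t.length := by simp only [List.length_cons] at h; omega
      rw [Nat.add_comm, List.getD_cons_succ]
      exact ih h'
    · have hs : samePrefix c (x :: t) = 0 := by simp [samePrefix, hx']
      rw [hs]
      simpa using hx'

theorem getD_drop' (ds : List Char) (k m : Nat) :
    (ds.drop k).getD m ' ' = ds.getD (k + m) ' ' := by
  simp [List.getD_eq_getElem?_getD, List.getElem?_drop]

theorem winP_shift (ds : List Char) (c : Char) (k : Nat) (hk1 : 1 ≤ k)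
    (hrun : ∀ i, i < k → ds.getD i ' ' = c) (hmax : k < ds.length → ds.getD k ' ' ≠ c)
    (n : Nat) (hn : k ≤ n) (hn2 : n + 1 < ds.length) :
    winP (ds.drop k) (n - k) = winP ds n := by
  have e : ∀ m, (ds.drop k).getD m ' ' = ds.getD (k + m) ' ' := getD_drop' ds k
  by_cases hnk : n = k
  · subst hnk
    have gm : ds.getD n ' ' ≠ c := hmax (by omega)
    have gr : ds.getD (n - 1) ' ' = c := hrun (n - 1) (by omega)
    have hmid : ((n == 0) || (ds.getD (n - 1) ' ' != ds.getD n ' ')) = true := by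
      have h0 : (ds.getD (n - 1) ' ' != ds.getD n ' ') = true := by
        rw [gr]
        exact bne_iff_ne.mpr (fun h => gm h.symm)
      rw [h0, Bool.or_true]
    have hmid' : ((n - n == 0) || ((ds.drop n).getD (n - n - 1) ' ' != (ds.drop n).getD (n - n) ' ')) = true := by
      rw [Nat.sub_self]
      rfl
    unfold winP
    rw [hmid, hmid']
    simp only [e, List.length_drop, Nat.sub_self]
    rw [show n + 0 = n by omega, show n + (0 + 1) = n + 1 by omega, show n + (0 + 2) = n + 2 by omega]
    have h3 : (decide (ds.length - n ≤ 0 + 2)) = (decide (ds.length ≤ n + 2)) := by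
      rw [decide_eq_decide]; omega
    rw [h3]
  · have hlt : k < n := by omega
    have hmid : ((n - k == 0) = (n == 0)) := by
      simp [Nat.sub_eq_zero_iff_le]
      omega
    unfold winP
    simp only [e, List.length_drop, hmid]
    rw [show k + (n - k) = n by omega, show k + (n - k + 1) = n + 1 by omega,
        show k + (n - k - 1) = n - 1 by omega, show k + (n - k + 2) = n + 2 by omega]
    have h3 : (decide (ds.length - k ≤ n - k + 2)) = (decide (ds.length ≤ n + 2)) := by
      rw [decide_eq_decide]; omega
    rw [h3]

theorem double_char (ds : List Char) :
    (runLengths ds).any (fun n => n == 2) = (List.range (ds.length - 1)).any (winP ds) := by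
  induction ds using runLengths.induct with
  | case1 => simp [runLengths]
  | case2 c rest k ih =>
    have hsp := samePrefix_le c rest
    have hkdef : k = 1 + samePrefix c rest := rfl
    have hrun : ∀ i, i < k → (c :: rest).getD i ' ' = c := by
      intro i hi
      cases i with
      | zero => simp
      | succ j =>
        rw [List.getD_cons_succ]
        exact samePrefix_get c rest j (by omega)
    have hmax : k < (c :: rest).length → (c :: rest).getD k ' ' ≠ c := by
      intro hlt
      rw [hkdef, Nat.add_comm, List.getD_cons_succ]
      refine samePrefix_max c rest ?_
      simp only [List.length_cons] at hlt
      omega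
    have hL : (c :: rest).length = rest.length + 1 := by simp
    have hkL : k ≤ (c :: rest).length := by omega
    rw [runLengths]
    rw [List.any_cons, ih]
    rw [Bool.eq_iff_iff]
    simp only [Bool.or_eq_true, List.any_eq_true, List.mem_range, beq_iff_eq, List.length_drop]
    constructor
    · rintro (hk2 | ⟨m, hm, hwm⟩)
      · refine ⟨0, by omega, ?_⟩
        have g0 : (c :: rest).getD 0 ' ' = c := hrun 0 (by omega)
        have g1 : (c :: rest).getD 1 ' ' = c := hrun 1 (by omega)
        simp only [winP, Bool.and_eq_true, Bool.or_eq_true, beq_iff_eq, bne_iff_ne,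
          decide_eq_true_eq]
        refine ⟨⟨?_, Or.inl trivial⟩, ?_⟩
        · rw [g0, g1]
        · by_cases h2 : (c :: rest).length ≤ 2
          · exact Or.inl h2
          · right
            have g2 : (c :: rest).getD 2 ' ' ≠ c := by
              have h := hmax (by omega)
              rw [hkdef, hk2] at h
              exact h
            rw [g0]
            exact g2
      · refine ⟨m + k, by omega, ?_⟩
        have := winP_shift (c :: rest) c k (by omega) hrun hmax (m + k) (by omega) (by omega)
        rw [Nat.add_sub_cancel] at this
        rw [← this]
        exact hwm
    · rintro ⟨n, hn, hw⟩
      by_cases hnk : n < k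
      · left
        -- n inside the first run: winP forces n = 0 and k = 2
        rcases Nat.eq_zero_or_pos n with h0 | hpos
        · subst h0
          have g0 : (c :: rest).getD 0 ' ' = c := hrun 0 (by omega)
          simp only [winP, Bool.and_eq_true, Bool.or_eq_true, beq_iff_eq, bne_iff_ne,
            decide_eq_true_eq] at hw
          obtain ⟨⟨h01, _⟩, h3⟩ := hw
          -- k ≥ 2
          have hk2 : 2 ≤ k := by
            by_contra hlt1
            have hk1' : k = 1 := by omega
            have := hmax (by omega)
            rw [hk1'] at this
            exact this (by rw [← h01, g0])
          -- k ≤ 2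
          have hk3 : k ≤ 2 := by
            by_contra hgt
            have g2 : (c :: rest).getD 2 ' ' = c := hrun 2 (by omega)
            rcases h3 with h3 | h3
            · omega
            · exact h3 (by rw [g2, g0])
          omega
        · exfalso
          have ga : (c :: rest).getD (n - 1) ' ' = c := hrun (n - 1) (by omega)
          have gb : (c :: rest).getD n ' ' = c := hrun n (by omega)
          simp only [winP, Bool.and_eq_true, Bool.or_eq_true, beq_iff_eq, bne_iff_ne,
            decide_eq_true_eq] at hw
          obtain ⟨⟨_, h2⟩, _⟩ := hw
          rcases h2 with h2 | h2
          · omega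
          · exact h2 (by rw [ga, gb])
      · right
        refine ⟨n - k, by omega, ?_⟩
        rw [winP_shift (c :: rest) c k (by omega) hrun hmax n (by omega) (by omega)]
        exact hw

theorem aStep_eval (ds : List Char) (hd : ∀ c ∈ ds, c.isDigit = true)
    (j : Nat) (hj : j + 1 < ds.length) (cd mi : Bool) :
    aStep ds (some (cd, mi)) (j : Int) = some (cd || winP ds j, mi && !decQ ds j) := by
  have hj0 : j < ds.length := by omega
  have g0 : PySem.List.pyGet? ds (j : Int) = some ds[j] := by
    rw [PySem.List.pyGet?_natCast]
    exact List.getElem?_eq_getElem hj0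
  have g1 : PySem.List.pyGet? ds ((j : Int) + 1) = some ds[j + 1] := by
    rw [show ((j : Int) + 1) = ((j + 1 : Nat) : Int) by push_cast; ring, PySem.List.pyGet?_natCast]
    exact List.getElem?_eq_getElem hj
  have o0 := ofStr?_digit ds[j] (hd _ (List.getElem_mem hj0))
  have o1 := ofStr?_digit ds[j + 1] (hd _ (List.getElem_mem hj))
  have dj : ds.getD j ' ' = ds[j] := List.getD_eq_getElem ds ' ' hj0
  have dj1 : ds.getD (j + 1) ' ' = ds[j + 1] := List.getD_eq_getElem ds ' ' hj
  unfold aStep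
  simp only [g0, g1, o0, o1]
  rw [Option.some.injEq, Prod.mk.injEq]
  have ej : ds[j]? = some ds[j] := List.getElem?_eq_getElem hj0
  have ej1 : ds[j + 1]? = some ds[j + 1] := List.getElem?_eq_getElem hj
  refine ⟨?_, ?_⟩
  · by_cases heq : ds[j] = ds[j + 1]
    · by_cases hj' : j = 0
      · subst hj'
        by_cases hend : ds.length ≤ 2
        · cases cd <;> simp [winP, ej, ej1, heq, hend]
        · have hlt : 2 < ds.length := by omega
          have hgm2' : PySem.List.pyGet? ds (2 : Int) = some (ds[2]'hlt) := by
            rw [show ((2 : Int)) = ((2 : Nat) : Int) by omega, PySem.List.pyGet?_natCast]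
            exact List.getElem?_eq_getElem hlt
          have hieI : ¬ ((ds.length : Int) ≤ (0 : Int) + 2) := by omega
          have hicI : ((0 : Int) < (ds.length : Int) - 2) := by omega
          by_cases hbp : ds[2]'hlt = ds[0 + 1] <;>
            cases cd <;> simp [winP, ej, ej1, heq, hend, hlt, hbp]
      · have hposn : 0 < j := by omega
        have hm : j - 1 < ds.length := by omega
        have ejm : ds[j - 1]? = some ds[j - 1] := List.getElem?_eq_getElem hm
        have hgm1' : PySem.List.pyGet? ds ((j : Int) - 1) = some (ds[j - 1]'hm) := by
          rw [show ((j : Int) - 1) = ((j - 1 : Nat) : Int) by omega, PySem.List.pyGet?_natCast]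
          exact List.getElem?_eq_getElem hm
        by_cases hend : ds.length ≤ j + 2
        · have hieI : ((ds.length : Int) ≤ (j : Int) + 2) := by omega
          by_cases hbm : ds[j - 1]'hm = ds[j + 1] <;>
            cases cd <;> simp [winP, ej, ej1, ejm, heq, hj', hposn, hend, hieI, hgm1', hbm]
        · have hp : j + 2 < ds.length := by omega
          have ejp : ds[j + 2]? = some ds[j + 2] := List.getElem?_eq_getElem hp
          have hgm2' : PySem.List.pyGet? ds ((j : Int) + 2) = some (ds[j + 2]'hp) := by
            rw [show ((j : Int) + 2) = ((j + 2 : Nat) : Int) by omega, PySem.List.pyGet?_natCast]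
            exact List.getElem?_eq_getElem hp
          have hieI : ¬ ((ds.length : Int) ≤ (j : Int) + 2) := by omega
          have hicI : ((j : Int) < (ds.length : Int) - 2) := by omega
          by_cases hbm : ds[j - 1]'hm = ds[j + 1] <;> by_cases hbp : ds[j + 2]'hp = ds[j + 1] <;>
            cases cd <;>
              simp [winP, ej, ej1, ejm, heq, hj', hposn, hend, hp, hieI, hicI,
                hgm1', hgm2', hbm, hbp]
    · cases cd <;> simp [winP, ej, ej1, heq]
  · by_cases hab : ds[j + 1] < ds[j]
    · have hn : ((ds[j].toNat : Int) - 48 > (ds[j + 1].toNat : Int) - 48) := by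
        have h : ds[j + 1].toNat < ds[j].toNat := hab
        omega
      simp [hn, decQ, ej, ej1, hab]
    · have hn : ¬ ((ds[j].toNat : Int) - 48 > (ds[j + 1].toNat : Int) - 48) := by
        have h : ¬ ds[j + 1].toNat < ds[j].toNat := hab
        omega
      simp [hn, decQ, ej, ej1, hab]

theorem foldA (ds : List Char) (hd : ∀ c ∈ ds, c.isDigit = true) (m : Nat)
    (hm : m + 1 ≤ ds.length) (cd mi : Bool) :
    ((List.range m).map (Nat.cast : Nat → Int)).foldl (aStep ds) (some (cd, mi)) =
      some (cd || (List.range m).any (winP ds), mi && !((List.range m).any (decQ ds))) := by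
  induction m with
  | zero => simp
  | succ m ih =>
    rw [List.range_succ, List.map_append, List.foldl_append, ih (by omega)]
    simp only [List.map_cons, List.map_nil, List.foldl_cons, List.foldl_nil]
    rw [aStep_eval ds hd m (by omega)]
    simp [List.any_append, Bool.or_assoc, Bool.and_assoc, Bool.not_or]

theorem A_char (pw : String) (hd : ∀ c ∈ pw.toList, c.isDigit = true) :
    is_legalpart2 pw = ((!((List.range (pw.toList.length - 1)).any (decQ pw.toList))) &&
      ((List.range (pw.toList.length - 1)).any (winP pw.toList))) := by
  simp only [is_legalpart2]
  cases hds : pw.toList with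
  | nil => decide
  | cons c rest =>
    rw [hds] at hd
    have hcast : (((c :: rest).length : Int) - 1) = ((rest.length : Nat) : Int) := by
      simp
    rw [hcast, PySem.List.pyRange_zero_natCast]
    have hone : (1 : Int).toNat = 1 := rfl
    rw [foldA (c :: rest) hd rest.length (by simp) false true]
    have hlen : (c :: rest).length - 1 = rest.length := by simp
    rw [hlen]
    cases h1 : (List.range rest.length).any (winP (c :: rest)) <;>
      cases h2 : (List.range rest.length).any (decQ (c :: rest)) <;> simp

-- on digit pairs, the int() comprehension evaluates to the subtraction-by-48 map
theorem pairInts_eval (l : List (Char × Char))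
    (h : ∀ p ∈ l, p.1.isDigit = true ∧ p.2.isDigit = true) :
    pairInts l = some (l.map (fun p => (((p.1.toNat : Int) - 48), ((p.2.toNat : Int) - 48)))) := by
  induction l with
  | nil => rfl
  | cons p t ih =>
    obtain ⟨a, b⟩ := p
    obtain ⟨h1, h2⟩ := h (a, b) (by simp)
    simp [pairInts, ofStr?_digit a h1, ofStr?_digit b h2, ih (fun q hq => h q (by simp [hq]))]

-- B's two components, pushed to the same index-based form (on all-digit strings)
theorem alt_char (pw : String) (hd : ∀ c ∈ pw.toList, c.isDigit = true) :
    is_legalpart2_alt pw = ((!((List.range (pw.toList.length - 1)).any (decQ pw.toList))) &&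
      ((List.range (pw.toList.length - 1)).any (winP pw.toList))) := by
  simp only [is_legalpart2_alt]
  rw [pairInts_eval _ (fun p hp =>
    ⟨hd _ (List.of_mem_zip hp).1, hd _ (List.mem_of_mem_drop (List.of_mem_zip hp).2)⟩)]
  have hall : ((pw.toList.zip (pw.toList.drop 1)).map
        (fun p => (((p.1.toNat : Int) - 48), ((p.2.toNat : Int) - 48)))).all
        (fun p => decide (p.1 ≤ p.2)) =
      ((pw.toList.zip (pw.toList.drop 1)).all (fun p => decide (p.1 ≤ p.2))) := by
    rw [List.all_map, Bool.eq_iff_iff]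
    simp only [List.all_eq_true, Function.comp]
    constructor
    · intro hq p hp
      have h0 := hq p hp
      simp only [decide_eq_true_eq] at h0 ⊢
      show p.1.toNat ≤ p.2.toNat
      omega
    · intro hq p hp
      have h0 := hq p hp
      simp only [decide_eq_true_eq] at h0 ⊢
      have h1 : p.1.toNat ≤ p.2.toNat := h0
      omega
  simp only []
  rw [hall, mono_char, double_char]

-- ===== VERDICT (by name: the statement is the Claim_ definition above) =====
theorem is_legalpart2_spec : Claim_equal_is_legalpart2 := by
  unfold Claim_equal_is_legalpart2
  intro pw _ hpre
  unfold Spec_is_legalpart2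
  rcases hpre with hlen | hall
  · -- length ≤ 1: A's loop never runs, B finds no run of length 2
    simp only [is_legalpart2, is_legalpart2_alt]
    cases hds : pw.toList with
    | nil =>
      simp only [runLengths]
      decide
    | cons c rest =>
      have hr : rest = [] := by
        rw [hds] at hlen
        simp only [List.length_cons] at hlen
        have : rest.length = 0 := by omega
        exact List.eq_nil_of_length_eq_zero this
      subst hr
      have h0 : ((([c] : List Char).length : Int) - 1) = 0 := by simp
      rw [h0]
      have h1 : PySem.List.pyRange 0 0 1 = [] := by decide
      rw [h1]
      simp [pairInts, runLengths, samePrefix]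
  · have hd : ∀ c ∈ pw.toList, c.isDigit = true := List.all_eq_true.mp hall
    rw [A_char pw hd, alt_char pw hd]
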